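-- pv_equiv track=rewrite | github.com/djpohly/csci232-examples-f24 | 12days.py | ordinal_suffix
-- ===== SOURCE A (Python) =====
-- def ordinal_suffix(n):
--     assert n >= 0
--     if n >= 100:
--         return ordinal_suffix(n % 100)
--     if n == 1:
--         return "st"
--     elif n == 2:
--         return "nd"
--     elif n == 3:
--         return "rd"
--     elif n < 20:
--         return "th"
--     else:
--         return ordinal_suffix(n % 10)
-- ===== SOURCE B (Python) =====
-- def ordinal_suffix(n):
--     assert n >= 0
--     m = n % 100
--     if 11 <= m <= 13:
--         return "th"
--     d = m % 10
--     if d == 1: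
--         return "st"
--     elif d == 2:
--         return "nd"
--     elif d == 3:
--         return "rd"
--     else:
--         return "th"
-- ===== Notes on version B (the rewrite author's own statement) =====
-- stated objective: simpler
-- what changed: Replaced A's two-level recursive reduction (recurse on n%100, then on n%10) by the flat closed-form ordinal rule: compute m = n%100 once, return 'th' for 11<=m<=13, otherwise switch on the last digit m%10.
import Mathlib
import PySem

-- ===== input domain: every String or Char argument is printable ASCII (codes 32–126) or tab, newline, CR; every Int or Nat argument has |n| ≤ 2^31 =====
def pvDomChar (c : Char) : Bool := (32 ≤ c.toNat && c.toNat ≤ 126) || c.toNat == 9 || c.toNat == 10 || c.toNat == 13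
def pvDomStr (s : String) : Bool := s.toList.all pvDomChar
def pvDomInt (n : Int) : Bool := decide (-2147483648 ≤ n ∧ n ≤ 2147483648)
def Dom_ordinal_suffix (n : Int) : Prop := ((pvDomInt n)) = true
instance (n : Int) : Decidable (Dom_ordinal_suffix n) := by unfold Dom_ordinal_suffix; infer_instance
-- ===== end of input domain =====

-- B replaces A's two-level recursion (by %100 then %10) with the flat closed-form
-- ordinal rule (m = n%100; 'th' for 11..13, else switch on m%10): simpler, no recursion.

-- ===== PORT A =====
def ordinal_suffix (n : Int) : String :=
  if n ≥ 100 then ordinal_suffix (PySem.Int.mod n 100)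
  else if n = 1 then "st"
  else if n = 2 then "nd"
  else if n = 3 then "rd"
  else if n < 20 then "th"
  else ordinal_suffix (PySem.Int.mod n 10)
termination_by n.toNat
decreasing_by
  · have h := PySem.Int.mod_eq_emod_of_pos (a := n) (b := 100) (by norm_num)
    have h1 := Int.emod_nonneg n (show (100:Int) ≠ 0 by norm_num)
    have h2 := Int.emod_lt_of_pos n (show (0:Int) < 100 by norm_num)
    rw [h]; omega
  · have h := PySem.Int.mod_eq_emod_of_pos (a := n) (b := 10) (by norm_num)
    have h1 := Int.emod_nonneg n (show (10:Int) ≠ 0 by norm_num)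
    have h2 := Int.emod_lt_of_pos n (show (0:Int) < 10 by norm_num)
    rw [h]; omega

-- ===== PORT B =====
def ordinal_suffix_alt (n : Int) : String :=
  let m := PySem.Int.mod n 100
  if 11 ≤ m ∧ m ≤ 13 then "th"
  else
    let d := PySem.Int.mod m 10
    if d = 1 then "st"
    else if d = 2 then "nd"
    else if d = 3 then "rd"
    else "th"

-- ===== PRECONDITION & SPEC =====
-- Pre_ excludes exactly n < 0, where A's `assert n >= 0` raises AssertionError (B keeps the same assert).
def Pre_ordinal_suffix (n : Int) : Prop := 0 ≤ n
instance (n : Int) : Decidable (Pre_ordinal_suffix n) := by unfold Pre_ordinal_suffix; infer_instance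
def pvWitness_ordinal_suffix : Int := (23)

def Spec_ordinal_suffix (n : Int) (out : String) : Prop := out = ordinal_suffix_alt n
instance (n : Int) (out : String) : Decidable (Spec_ordinal_suffix n out) := by unfold Spec_ordinal_suffix; infer_instance

-- ===== CLAIM (what is proved, stated in full; the proofs are below) =====
def Claim_equal_ordinal_suffix : Prop := ∀ (n : Int), Dom_ordinal_suffix n → Pre_ordinal_suffix n → Spec_ordinal_suffix n (ordinal_suffix n)

-- ===== LEMMAS AND PROOFS =====

-- A = B on 0 ≤ n < 100 (the base of A's outer recursion)
theorem ordinal_suffix_base (n : Int) (h0 : 0 ≤ n) (h100 : n < 100) :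
    ordinal_suffix n = ordinal_suffix_alt n := by
  have hm100 : PySem.Int.mod n 100 = n % 100 :=
    PySem.Int.mod_eq_emod_of_pos (by norm_num)
  have hn100 : n % 100 = n := Int.emod_eq_of_lt h0 h100
  have hm10 : PySem.Int.mod n 10 = n % 10 :=
    PySem.Int.mod_eq_emod_of_pos (by norm_num)
  rw [ordinal_suffix]
  simp only [ordinal_suffix_alt, hm100, hn100, hm10]
  by_cases h1 : n = 1
  · subst h1; norm_num
  by_cases h2 : n = 2
  · subst h2; norm_num
  by_cases h3 : n = 3
  · subst h3; norm_num
  by_cases h20 : n < 20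
  · -- A returns "th"; B's window/digit also yields "th"
    have hge : ¬ (n ≥ 100) := by omega
    simp only [hge, if_false, h1, h2, h3, if_false, h20, if_true]
    by_cases hw : 11 ≤ n ∧ n ≤ 13
    · simp [hw]
    · have hd1 : ¬ (n % 10 = 1) := by omega
      have hd2 : ¬ (n % 10 = 2) := by omega
      have hd3 : ¬ (n % 10 = 3) := by omega
      simp [hw, hd1, hd2, hd3]
  · -- 20 ≤ n < 100: A recurses on n % 10; B switches on n % 10
    have hge : ¬ (n ≥ 100) := by omega
    have hw : ¬ (11 ≤ n ∧ n ≤ 13) := by omega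
    simp only [hge, if_false, h1, h2, h3, if_false, h20, if_false, hw]
    set d := n % 10 with hd
    have hd0 : 0 ≤ d := Int.emod_nonneg n (by norm_num)
    have hd10 : d < 10 := Int.emod_lt_of_pos n (by norm_num)
    rw [ordinal_suffix]
    have hdge : ¬ (d ≥ 100) := by omega
    have hdlt : d < 20 := by omega
    simp only [hdge, if_false, hdlt, if_true, if_false]

-- B depends on n only through n % 100
theorem alt_mod100 (n : Int) :
    ordinal_suffix_alt (n % 100) = ordinal_suffix_alt n := by
  have h : PySem.Int.mod (n % 100) 100 = PySem.Int.mod n 100 := by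
    rw [PySem.Int.mod_eq_emod_of_pos (by norm_num),
        PySem.Int.mod_eq_emod_of_pos (by norm_num)]
    exact Int.emod_emod_of_dvd n (dvd_refl 100)
  simp only [ordinal_suffix_alt, h]

-- ===== VERDICT (by name: the statement is the Claim_ definition above) =====
theorem ordinal_suffix_spec : Claim_equal_ordinal_suffix := by
  intro n _ hpre
  unfold Spec_ordinal_suffix
  by_cases h : n ≥ 100
  · have hm : PySem.Int.mod n 100 = n % 100 :=
      PySem.Int.mod_eq_emod_of_pos (by norm_num)
    rw [ordinal_suffix]
    simp only [h, if_true, hm]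
    rw [ordinal_suffix_base (n % 100) (Int.emod_nonneg n (by norm_num))
        (Int.emod_lt_of_pos n (by norm_num))]
    exact alt_mod100 n
  · exact ordinal_suffix_base n hpre (by omega)
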